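-- pv_equiv track=rewrite | github.com/Hwannni/Coding-Test | Level_0/Day6/Q2.py | solution
-- ===== SOURCE A (Python) =====
-- def solution(n, control):
--     answer = 0
--
--     for char in control:
--         if char == 'w':
--             answer += 1
--         elif char == 's':
--             answer -= 1
--         elif char == 'd':
--             answer += 10
--         elif char == 'a':
--             answer -= 10
--
--     return answer
-- ===== SOURCE B (Python) =====
-- def solution(n, control):
--     return (control.count('w') - control.count('s')
--             + 10 * control.count('d') - 10 * control.count('a'))
-- ===== Notes on version B (the rewrite author's own statement) =====
-- stated objective: faster
-- what changed: Replaces the per-character branching accumulator loop with a closed-form arithmetic combination of four str.count scans.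
import Mathlib
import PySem

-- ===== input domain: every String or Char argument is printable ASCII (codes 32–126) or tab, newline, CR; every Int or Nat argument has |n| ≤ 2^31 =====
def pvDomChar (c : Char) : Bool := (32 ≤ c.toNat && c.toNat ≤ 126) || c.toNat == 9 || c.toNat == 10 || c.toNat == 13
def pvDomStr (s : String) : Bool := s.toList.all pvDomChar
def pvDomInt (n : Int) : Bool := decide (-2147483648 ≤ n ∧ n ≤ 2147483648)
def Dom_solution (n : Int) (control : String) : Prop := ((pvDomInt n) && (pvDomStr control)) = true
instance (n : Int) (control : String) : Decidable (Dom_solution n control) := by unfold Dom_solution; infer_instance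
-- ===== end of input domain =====

-- B replaces the per-character branching loop with four str.count scans combined
-- arithmetically (objective: simpler).

-- ===== PORT A =====
def solution (n : Int) (control : String) : Int :=
  control.toList.foldl
    (fun answer char =>
      if char == 'w' then answer + 1
      else if char == 's' then answer - 1
      else if char == 'd' then answer + 10
      else if char == 'a' then answer - 10
      else answer)
    0

-- ===== PORT B =====
def solution_alt (n : Int) (control : String) : Int :=
  (PySem.Str.count control "w" : Int) - (PySem.Str.count control "s" : Int)
    + 10 * (PySem.Str.count control "d" : Int) - 10 * (PySem.Str.count control "a" : Int)

-- ===== PRECONDITION & SPEC =====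
def Spec_solution (n : Int) (control : String) (out : Int) : Prop := out = solution_alt n control
instance (n : Int) (control : String) (out : Int) : Decidable (Spec_solution n control out) := by unfold Spec_solution; infer_instance

-- ===== CLAIM (what is proved, stated in full; the proofs are below) =====
def Claim_equal_solution : Prop := ∀ (n : Int) (control : String), Dom_solution n control → Spec_solution n control (solution n control)

-- ===== LEMMAS AND PROOFS =====

-- Python's str.count with a single-character needle is List.count of that character.
theorem chars_count_go_singleton (c : Char) (l : List Char) (fuel : Nat) (acc : Nat)
    (h : l.length ≤ fuel) :
    PySem.Chars.count.go [c] fuel l acc = acc + l.count c := by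
  induction l generalizing fuel acc with
  | nil => cases fuel <;> simp [PySem.Chars.count.go]
  | cons x t ih =>
    cases fuel with
    | zero => simp at h
    | succ f =>
      have hlen : t.length ≤ f := by simpa using h
      by_cases hx : c = x
      · subst hx
        simp only [PySem.Chars.count.go, List.isPrefixOf, beq_self_eq_true, Bool.true_and,
          if_true, List.length_singleton, List.drop_one,
          List.tail_cons]
        rw [ih f (acc + 1) hlen]
        simp [List.count_cons]
        omega
      · have hbeq : (c == x) = false := by simpa using hx
        simp only [PySem.Chars.count.go, List.isPrefixOf, hbeq, Bool.false_and]
        rw [ih f acc hlen]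
        simp [Ne.symm hx]

theorem count_singleton (s : List Char) (c : Char) :
    PySem.Chars.count s [c] = s.count c := by
  simp [PySem.Chars.count, chars_count_go_singleton c s s.length 0 le_rfl]

theorem foldl_step (l : List Char) (a : Int) :
    l.foldl
      (fun answer char =>
        if char == 'w' then answer + 1
        else if char == 's' then answer - 1
        else if char == 'd' then answer + 10
        else if char == 'a' then answer - 10
        else answer) a
    = a + (l.count 'w' : Int) - (l.count 's' : Int)
        + 10 * (l.count 'd' : Int) - 10 * (l.count 'a' : Int) := by
  induction l generalizing a with
  | nil => simp
  | cons x t ih =>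
    simp only [List.foldl_cons, List.count_cons, ih]
    by_cases hw : x = 'w' <;> by_cases hs : x = 's' <;> by_cases hd : x = 'd' <;>
      by_cases ha : x = 'a' <;> simp_all <;> push_cast <;> try ring

-- ===== VERDICT (by name: the statement is the Claim_ definition above) =====
theorem solution_spec : Claim_equal_solution := by
  intro n control _
  unfold Spec_solution solution solution_alt
  rw [foldl_step]
  simp [PySem.Str.count_eq, count_singleton]
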